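-- pv_equiv track=rewrite | github.com/sean0x09/gp-founder-update | test/normalize_titles.py | choose_canonical_title
-- ===== SOURCE A (Python) =====
-- from collections import defaultdict
--
-- def choose_canonical_title(variants):
--     """
--     Choose the best canonical title from a list of variants.
--     Prefers:
--     1. The most common variant
--     2. If tie, the one with proper capitalization
--     3. If tie, the one using "&" instead of "and"
--     4. If tie, the shortest one
--     """
--     if not variants:
--         return None
--
--     # Count occurrences
--     variant_counts = defaultdict(int)
--     for variant in variants:
--         variant_counts[variant] += 1
--
--     # Find the most common
--     max_count = max(variant_counts.values())
--     most_common = [v for v, count in variant_counts.items() if count == max_count]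
--
--     # Scoring function for canonical selection
--     def score_title(title):
--         score = 0
--         # Prefer proper capitalization (first letter uppercase)
--         if title and title[0].isupper():
--             score += 100
--         # Prefer "&" over "and"
--         if ' & ' in title or '&' in title:
--             score += 50
--         elif ' and ' in title.lower():
--             score += 25
--         # Prefer shorter (but not too short)
--         score += max(0, 20 - len(title))
--         return score
--
--     # Score all most common variants
--     scored = [(v, score_title(v)) for v in most_common]
--     scored.sort(key=lambda x: x[1], reverse=True)
--
--     return scored[0][0] if scored else most_common[0]
-- ===== SOURCE B (Python) =====
-- def choose_canonical_title(variants):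
--     if not variants:
--         return None
--
--     variant_counts = {}
--     for v in variants:
--         variant_counts[v] = variant_counts.get(v, 0) + 1
--
--     def score_title(title):
--         score = 0
--         if title and title[0].isupper():
--             score += 100
--         if ' & ' in title or '&' in title:
--             score += 50
--         elif ' and ' in title.lower():
--             score += 25
--         score += max(0, 20 - len(title))
--         return score
--
--     # single argmax over distinct variants: most frequent first, formatting score breaks ties,
--     # first insertion wins remaining ties (same as A's stable reverse sort)
--     return max(variant_counts.items(), key=lambda kv: (kv[1], score_title(kv[0])))[0]
-- ===== Notes on version B (the rewrite author's own statement) =====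
-- stated objective: simpler
-- what changed: A's four-phase pipeline (max of counts, filter most-common, score list, stable reverse sort then take head) is collapsed into one argmax over the distinct variants with the composite key (count, score_title); ties still resolve to the first-inserted variant, as in A's stable sort.
import Mathlib
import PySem

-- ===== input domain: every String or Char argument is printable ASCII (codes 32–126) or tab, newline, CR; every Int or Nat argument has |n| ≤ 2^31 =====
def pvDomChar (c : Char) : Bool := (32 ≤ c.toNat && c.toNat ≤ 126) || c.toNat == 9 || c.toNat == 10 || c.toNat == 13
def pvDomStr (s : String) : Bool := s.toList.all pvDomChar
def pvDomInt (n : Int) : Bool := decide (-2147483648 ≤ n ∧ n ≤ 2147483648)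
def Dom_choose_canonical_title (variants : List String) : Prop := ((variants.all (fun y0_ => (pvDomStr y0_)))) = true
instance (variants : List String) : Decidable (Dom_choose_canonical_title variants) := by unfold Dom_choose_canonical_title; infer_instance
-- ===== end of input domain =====

-- B replaces A's max-count / filter / score / stable-reverse-sort pipeline by a single argmax over the
-- distinct variants with the composite key (count, score): simpler, one selection pass instead of four.

-- ===== PORT A =====
-- the nested helper score_title; A's and B's Pythons contain the identical def, so it is shared
def score_title (title : String) : Int :=
  let score : Int := 0
  -- if title and title[0].isupper(): score += 100
  let score := if (match title.toList with
                   | [] => false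
                   | c :: _ => PySem.Chars.isupper c) then score + 100 else score
  -- '&' / ' and ' preference
  let score := if PySem.Str.isIn " & " title || PySem.Str.isIn "&" title then score + 50
               else if PySem.Str.isIn " and " (PySem.Str.lower title) then score + 25
               else score
  -- score += max(0, 20 - len(title))
  score + max 0 (20 - PySem.Str.len title)

def choose_canonical_title (variants : List String) : Option String :=
  if variants.isEmpty then none
  else
    -- variant_counts = defaultdict(int); for variant in variants: variant_counts[variant] += 1
    let variant_counts : PySem.Dict String Int :=
      variants.foldl (fun d v => d.modify v 0 (· + 1)) PySem.Dict.empty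
    -- max_count = max(variant_counts.values())  (max() of an empty sequence raises: none; unreachable here)
    match PySem.List.max? variant_counts.values (fun x => x) with
    | none => none
    | some max_count =>
      let most_common := (variant_counts.items.filter (fun p => p.2 == max_count)).map (fun p => p.1)
      let scored := most_common.map (fun v => (v, score_title v))
      let scored_sorted := PySem.List.sorted scored (fun x => x.2) true
      -- return scored[0][0] if scored else most_common[0]
      match scored_sorted with
      | p :: _ => some p.1
      | [] => PySem.List.pyGet? most_common 0

-- ===== PORT B =====
def choose_canonical_title_alt (variants : List String) : Option String :=
  if variants.isEmpty then none
  else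
    -- variant_counts = {}; for v in variants: variant_counts[v] = variant_counts.get(v, 0) + 1
    let variant_counts : PySem.Dict String Int :=
      variants.foldl (fun d v => d.insert v (d.getD v 0 + 1)) PySem.Dict.empty
    -- return max(variant_counts.items(), key=lambda kv: (kv[1], score_title(kv[0])))[0]
    match PySem.List.max2? variant_counts.items (fun kv => kv.2) (fun kv => score_title kv.1) with
    | some kv => some kv.1
    | none => none

-- ===== PRECONDITION & SPEC =====
def Spec_choose_canonical_title (variants : List String) (out : Option String) : Prop := out = choose_canonical_title_alt variants
instance (variants : List String) (out : Option String) : Decidable (Spec_choose_canonical_title variants out) := by unfold Spec_choose_canonical_title; infer_instance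

-- ===== CLAIM (what is proved, stated in full; the proofs are below) =====
def Claim_equal_choose_canonical_title : Prop := ∀ (variants : List String), Dom_choose_canonical_title variants → Spec_choose_canonical_title variants (choose_canonical_title variants)

-- ===== LEMMAS AND PROOFS =====

-- the selection step of max(…, key=lambda kv: (count, score)) on a (String × Int) pair
def gstep (m x : String × Int) : String × Int :=
  if (decide (m.2 < x.2) || (!decide (x.2 < m.2) && decide (score_title m.1 < score_title x.1))) then x else m

-- the selection step of "first element with maximal score"
def fstep (m w : String) : String := if score_title m < score_title w then w else m

lemma foldl_option_step {α : Type} (F : Option α → α → Option α) (g : α → α → α)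
    (h : ∀ m x, F (some m) x = some (g m x)) :
    ∀ (l : List α) (a : α), List.foldl F (some a) l = some (l.foldl g a) := by
  intro l
  induction l with
  | nil => intro a; rfl
  | cons x l ih => intro a; simp only [List.foldl_cons, h]; exact ih (g a x)

-- B's max2? from a nonempty list is a plain fold of gstep
lemma max2?_eq_foldl (l : List (String × Int)) (a : String × Int) :
    PySem.List.max2? (a :: l) (fun kv => kv.2) (fun kv => score_title kv.1) = some (l.foldl gstep a) := by
  simp only [PySem.List.max2?, List.foldl_cons]
  exact foldl_option_step _ gstep (fun m x => by simp only [gstep, apply_ite some]) l a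

-- head of the reverse insertion sort is the running first-max (stability made explicit)
lemma ins_fold_head (l : List (String × Int)) :
    ∀ (m : String × Int) (t : List (String × Int)), (∀ y ∈ m :: t, y.2 ≤ m.2) →
    ∃ t', List.foldl (fun acc x => PySem.List.insertBy (fun a b : String × Int => decide (b.2 < a.2)) x acc) (m :: t) l
            = (l.foldl (fun m x => if m.2 < x.2 then x else m) m) :: t'
          ∧ ∀ y ∈ (l.foldl (fun m x => if m.2 < x.2 then x else m) m) :: t',
              y.2 ≤ (l.foldl (fun m x => if m.2 < x.2 then x else m) m).2 := by
  induction l with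
  | nil => intro m t h; exact ⟨t, rfl, h⟩
  | cons x l ih =>
    intro m t h
    simp only [List.foldl_cons]
    by_cases hx : m.2 < x.2
    · rw [show PySem.List.insertBy (fun a b : String × Int => decide (b.2 < a.2)) x (m :: t) = x :: m :: t by
        simp [PySem.List.insertBy, hx]]
      rw [show (if m.2 < x.2 then x else m) = x from if_pos hx]
      refine ih x (m :: t) ?_
      intro y hy
      rw [List.mem_cons] at hy
      rcases hy with rfl | hy
      · exact le_refl _
      · exact le_of_lt (lt_of_le_of_lt (h y hy) hx)
    · rw [show PySem.List.insertBy (fun a b : String × Int => decide (b.2 < a.2)) x (m :: t)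
            = m :: PySem.List.insertBy (fun a b : String × Int => decide (b.2 < a.2)) x t by
        simp [PySem.List.insertBy, hx]]
      rw [show (if m.2 < x.2 then x else m) = m from if_neg hx]
      refine ih m (PySem.List.insertBy (fun a b : String × Int => decide (b.2 < a.2)) x t) ?_
      intro y hy
      rw [List.mem_cons] at hy
      rcases hy with rfl | hy
      · exact le_refl _
      · rw [PySem.List.mem_insertBy] at hy
        rcases hy with rfl | hy
        · exact le_of_not_gt hx
        · exact h y (by simp [hy])

lemma sorted_rev_head (l : List (String × Int)) (a : String × Int) :
    ∃ t, PySem.List.sorted (a :: l) (fun x => x.2) true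
           = (l.foldl (fun m x => if m.2 < x.2 then x else m) a) :: t := by
  rw [PySem.List.sorted_rev_eq_foldl_insertBy]
  simp only [List.foldl_cons]
  rw [show PySem.List.insertBy (fun x y : String × Int => decide ((fun p : String × Int => p.2) y < (fun p : String × Int => p.2) x)) a [] = [a] from rfl]
  obtain ⟨t', h1, _⟩ := ins_fold_head l a [] (by simp)
  exact ⟨t', h1⟩

-- folding the pair-max over the scored list is scoring the fold of fstep
lemma scored_fold (r : List String) :
    ∀ (v : String),
    (r.map (fun w => (w, score_title w))).foldl (fun m x : String × Int => if m.2 < x.2 then x else m) (v, score_title v)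
      = (r.foldl fstep v, score_title (r.foldl fstep v)) := by
  induction r with
  | nil => intro v; rfl
  | cons w r ih =>
    intro v
    simp only [List.map_cons, List.foldl_cons, fstep]
    by_cases h : score_title v < score_title w
    · rw [if_pos h, if_pos h]; exact ih w
    · rw [if_neg h, if_neg h]; exact ih v

-- core: A's filter-by-max-count then first-max-by-score equals B's single lexicographic argmax
lemma core (l : List (String × Int)) (a : String × Int) :
    (l.foldl gstep a).2 = (l.map (fun p : String × Int => p.2)).foldl max a.2 ∧
    ∃ m r, (((a :: l).filter (fun p => p.2 == (l.map (fun p : String × Int => p.2)).foldl max a.2)).map (fun p => p.1))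
            = m :: r
         ∧ r.foldl fstep m = (l.foldl gstep a).1 := by
  induction l using List.reverseRecOn with
  | nil => exact ⟨rfl, a.1, [], by simp, rfl⟩
  | append_singleton l x ih =>
    obtain ⟨hG2, m, r, hfil, hfold⟩ := ih
    have hbound : ∀ p ∈ a :: l, p.2 ≤ (l.map (fun p : String × Int => p.2)).foldl max a.2 := by
      rw [List.foldl_map]
      intro p hp
      rw [List.mem_cons] at hp
      rcases hp with rfl | hp
      · exact (PySem.List.le_foldl_max_int l (fun p : String × Int => p.2) p.2).1
      · exact (PySem.List.le_foldl_max_int l (fun p : String × Int => p.2) a.2).2 p hp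
    set mc := (l.map (fun p : String × Int => p.2)).foldl max a.2 with hmc
    set G := l.foldl gstep a with hG
    have hmap' : ((l ++ [x]).map (fun p : String × Int => p.2)).foldl max a.2 = max mc x.2 := by
      simp [List.map_append, List.foldl_append, hmc]
    have hGa : (l ++ [x]).foldl gstep a = gstep G x := by simp [List.foldl_append, hG]
    rw [hGa, hmap', ← List.cons_append]
    rcases lt_trichotomy x.2 mc with hlt | heq | hgt
    · have hmax : max mc x.2 = mc := max_eq_left hlt.le
      have hg : gstep G x = G := by
        rw [gstep, if_neg]
        simp only [Bool.or_eq_true, decide_eq_true_eq, Bool.and_eq_true, Bool.not_eq_true',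
          decide_eq_false_iff_not, not_or, not_and, not_lt]
        constructor
        · omega
        · intro hc; exfalso; rw [hG2] at hc; omega
      rw [hmax, hg]
      refine ⟨hG2, m, r, ?_, hfold⟩
      rw [List.filter_append, List.map_append]
      rw [show List.filter (fun p : String × Int => p.2 == mc) [x] = [] by
        rw [List.filter_singleton]; simp only [beq_iff_eq, Bool.cond_eq_ite]
        rw [if_neg]; omega]
      simpa using hfil
    · have hmax : max mc x.2 = mc := by omega
      rw [hmax]
      have hcond : (decide (G.2 < x.2) || (!decide (x.2 < G.2) && decide (score_title G.1 < score_title x.1)))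
          = decide (score_title G.1 < score_title x.1) := by
        rw [hG2]
        simp [heq]
      refine ⟨?_, m, r ++ [x.1], ?_, ?_⟩
      · rw [gstep, hcond]
        split
        · exact heq
        · exact hG2
      · rw [List.filter_append, List.map_append]
        rw [show List.filter (fun p : String × Int => p.2 == mc) [x] = [x] by simp [List.filter, heq]]
        rw [hfil]; simp
      · rw [List.foldl_append, hfold]
        simp only [List.foldl_cons, List.foldl_nil, gstep, hcond]
        by_cases hs : score_title G.1 < score_title x.1
        · simp [fstep, hs]
        · simp [fstep, hs]
    · have hmax : max mc x.2 = x.2 := max_eq_right hgt.le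
      have hg : gstep G x = x := by
        rw [gstep, if_pos]; simp only [Bool.or_eq_true, decide_eq_true_eq]; left; omega
      rw [hmax, hg]
      refine ⟨rfl, x.1, [], ?_, rfl⟩
      rw [List.filter_append, List.map_append]
      rw [show List.filter (fun p : String × Int => p.2 == x.2) (a :: l) = [] by
        rw [List.filter_eq_nil_iff]; intro p hp; simp only [beq_iff_eq]; have := hbound p hp; omega]
      simp [List.filter]

-- the two tails after the counting dict, proved equal for any dict with nonempty items
lemma tails_eq (d : PySem.Dict String Int) (a : String × Int) (l' : List (String × Int))
    (hitems : d.items = a :: l') :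
    (match PySem.List.max? d.values (fun x => x) with
     | none => none
     | some max_count =>
       match PySem.List.sorted ((List.map (fun p => p.1) (List.filter (fun p : String × Int => p.2 == max_count) d.items)).map (fun v => (v, score_title v))) (fun x => x.2) true with
       | p :: _ => some p.1
       | [] => PySem.List.pyGet? (List.map (fun p => p.1) (List.filter (fun p : String × Int => p.2 == max_count) d.items)) 0)
    = (match PySem.List.max2? d.items (fun kv => kv.2) (fun kv => score_title kv.1) with
       | some kv => some kv.1
       | none => none) := by
  rw [show PySem.Dict.values d = (a :: l').map (fun p => p.2) by rw [PySem.Dict.values, hitems]]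
  rw [hitems, List.map_cons, PySem.List.max?_id_cons, max2?_eq_foldl]
  obtain ⟨hG2, m, r, hfil, hfold⟩ := core l' a
  rw [show (l'.map (fun p : String × Int => p.2)).foldl max a.2 = List.foldl max a.2 (List.map (fun p => p.2) l') from rfl] at hfil
  simp only []
  rw [hfil]
  obtain ⟨t, hsorted⟩ := sorted_rev_head (r.map (fun w => (w, score_title w))) (m, score_title m)
  rw [List.map_cons, hsorted, scored_fold, hfold]

-- ===== VERDICT (by name: the statement is the Claim_ definition above) =====
theorem choose_canonical_title_spec : Claim_equal_choose_canonical_title := by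
  intro variants _
  unfold Spec_choose_canonical_title
  cases variants with
  | nil => rfl
  | cons v vs =>
    rw [choose_canonical_title, choose_canonical_title_alt]
    rw [if_neg (by simp), if_neg (by simp)]
    rw [show (v :: vs).foldl (fun d v => d.modify v 0 (· + 1)) PySem.Dict.empty = PySem.Dict.counter (v :: vs) from (PySem.Dict.counter_eq_foldl (v :: vs)).symm]
    rw [show (v :: vs).foldl (fun d v => d.insert v (d.getD v 0 + 1)) PySem.Dict.empty = PySem.Dict.counter (v :: vs) from PySem.Dict.foldl_insert_getD_add_one_eq_counter (v :: vs)]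
    have hne : (PySem.Dict.counter (v :: vs)).items ≠ [] := by
      rw [PySem.Dict.items_counter]
      intro hcontra
      have hv : v ∈ PySem.Set.ofList (v :: vs) := (PySem.Set.mem_ofList _ v).mpr (by simp)
      rw [List.map_eq_nil_iff] at hcontra
      rw [hcontra] at hv
      exact (List.not_mem_nil) hv
    obtain ⟨a, l', hitems⟩ := List.exists_cons_of_ne_nil hne
    exact tails_eq (PySem.Dict.counter (v :: vs)) a l' hitems
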